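-- pv_equiv track=rewrite | github.com/chanyoung1998/Algorithm-Study | 백준 문제풀기/중급문제풀기/이분탐색/algorithm_1790.py | calc
-- ===== SOURCE A (Python) =====
-- def calc(num):
--     exp = 0
--     count = 0
--     while True:
--         if num <= 10 ** (exp + 1) - 1:
--             count += (num - 10**exp + 1) * (exp + 1)
--             break
--
--         count += (10 ** (exp + 1) - 10 ** exp) * (exp + 1)
--         exp += 1
--
--     return count
-- ===== SOURCE B (Python) =====
-- def calc(num):
--     d = 1
--     while num >= 10 ** d:
--         d += 1
--     return (num + 1) * d - (10 ** d - 1) // 9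
-- ===== Notes on version B (the rewrite author's own statement) =====
-- stated objective: simpler
-- what changed: Replaces A's per-digit-length accumulation loop (adding a block of digit counts for each length) with a minimal digit-count loop followed by a single closed-form expression (num+1)*d - (10**d - 1)//9.
import Mathlib
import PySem

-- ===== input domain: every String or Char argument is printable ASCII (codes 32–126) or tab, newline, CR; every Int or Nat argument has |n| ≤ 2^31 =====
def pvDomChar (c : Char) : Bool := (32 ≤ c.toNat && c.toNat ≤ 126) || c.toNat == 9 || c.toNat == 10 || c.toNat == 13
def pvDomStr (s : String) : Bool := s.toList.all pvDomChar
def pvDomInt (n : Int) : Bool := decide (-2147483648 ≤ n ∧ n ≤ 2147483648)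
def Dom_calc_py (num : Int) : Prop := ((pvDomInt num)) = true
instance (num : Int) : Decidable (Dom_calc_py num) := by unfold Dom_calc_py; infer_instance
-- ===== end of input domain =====

-- B replaces A's per-digit-length accumulation loop with a digit-count loop plus one
-- closed-form arithmetic formula (objective: simpler).

-- ===== PORT A =====
-- while True: either terminate adding the last block, or add a full block and bump exp
def calcLoop (num : Int) (exp : Nat) (count : Int) : Int :=
  if num ≤ 10 ^ (exp + 1) - 1 then
    count + (num - 10 ^ exp + 1) * (exp + 1)
  else
    calcLoop num (exp + 1) (count + ((10:Int) ^ (exp + 1) - 10 ^ exp) * (exp + 1))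
termination_by (num - 10 ^ exp).toNat
decreasing_by
  have h1 : (10:Int) ^ exp < 10 ^ (exp + 1) := by
    have := pow_lt_pow_right₀ (a := (10:Int)) (by norm_num) (Nat.lt_succ_self exp)
    exact this
  omega

def calc_py (num : Int) : Int := calcLoop num 0 0

-- ===== PORT B =====
-- d = 1; while num >= 10 ** d: d += 1
def digitsLoop (num : Int) (d : Nat) : Nat :=
  if 10 ^ d ≤ num then digitsLoop num (d + 1) else d
termination_by (num + 1 - 10 ^ d).toNat
decreasing_by
  have h1 : (10:Int) ^ d < 10 ^ (d + 1) := by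
    have := pow_lt_pow_right₀ (a := (10:Int)) (by norm_num) (Nat.lt_succ_self d)
    exact this
  omega

def calc_py_alt (num : Int) : Int :=
  let d := digitsLoop num 1
  (num + 1) * d - PySem.Int.floordiv ((10:Int) ^ d - 1) 9

-- ===== PRECONDITION & SPEC =====
def Spec_calc_py (num : Int) (out : Int) : Prop := out = calc_py_alt num
instance (num : Int) (out : Int) : Decidable (Spec_calc_py num out) := by unfold Spec_calc_py; infer_instance

-- ===== CLAIM (what is proved, stated in full; the proofs are below) =====
def Claim_equal_calc_py : Prop := ∀ (num : Int), Dom_calc_py num → Spec_calc_py num (calc_py num)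

-- ===== LEMMAS AND PROOFS =====

-- digitsLoop is unchanged by one unrolling when the loop continues
theorem digitsLoop_step (num : Int) (d : Nat) (h : 10 ^ d ≤ num) :
    digitsLoop num d = digitsLoop num (d + 1) := by
  rw [digitsLoop]; simp [h]

-- the closed form of A's loop, with the geometric sum cleared of division (times 9)
theorem calcLoop_closed (num : Int) : ∀ (exp : Nat) (count : Int),
    9 * calcLoop num exp count =
      9 * count + 9 * (num + 1) * (digitsLoop num (exp + 1) : Int)
        - 9 * (10:Int) ^ exp * (exp + 1)
        - ((10:Int) ^ (digitsLoop num (exp + 1)) - 10 ^ (exp + 1)) := by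
  intro exp count
  induction exp, count using calcLoop.induct num with
  | case1 exp count h =>
    have hd : digitsLoop num (exp + 1) = exp + 1 := by
      rw [digitsLoop]
      have : ¬ (10:Int) ^ (exp + 1) ≤ num := by omega
      simp [this]
    rw [calcLoop, if_pos h, hd]
    push_cast
    ring
  | case2 exp count h ih =>
    have hge : (10:Int) ^ (exp + 1) ≤ num := by omega
    rw [calcLoop, if_neg h, ih, digitsLoop_step num (exp + 1) hge]
    have h1 : (10:Int) ^ (exp + 1 + 1) = 10 * 10 ^ (exp + 1) := by ring
    push_cast
    ring

theorem nine_dvd_pow_sub_one (d : Nat) : (9:Int) ∣ 10 ^ d - 1 := by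
  have : (10:Int) ^ d - 1 = (∑ i ∈ Finset.range d, 10 ^ i) * (10 - 1) := by
    rw [geom_sum_mul]
  rw [this]; exact ⟨∑ i ∈ Finset.range d, 10 ^ i, by ring⟩

-- ===== VERDICT (by name: the statement is the Claim_ definition above) =====
theorem calc_py_spec : Claim_equal_calc_py := by
  unfold Claim_equal_calc_py
  intro num _
  unfold Spec_calc_py calc_py calc_py_alt
  have h := calcLoop_closed num 0 0
  norm_num at h
  set d := digitsLoop num 1 with hd
  have hfd : PySem.Int.floordiv ((10:Int) ^ d - 1) 9 = ((10:Int) ^ d - 1) / 9 :=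
    PySem.Int.floordiv_eq_ediv_of_pos (by norm_num)
  have hfd9 : 9 * PySem.Int.floordiv ((10:Int) ^ d - 1) 9 = (10:Int) ^ d - 1 := by
    rw [hfd]; exact Int.mul_ediv_cancel' (nine_dvd_pow_sub_one d)
  refine mul_left_cancel₀ (by norm_num : (9:Int) ≠ 0) ?_
  rw [mul_sub, hfd9]
  linarith [h]
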